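-- pv_equiv track=rewrite | github.com/1610-Fappy/COMP3311-POKEMONDB | helpers.py | output_format
-- ===== SOURCE A (Python) =====
-- def split_tup_vals(tup_list : list):
--     if (len(tup_list) == 0):
--         return tup_list
--     evonum_list = []
--     name_list = []
--     req_list = []
--
--     for t in tup_list:
--         evonum_list.append(t[0])
--         name_list.append(t[2])
--         req_list.append(t[3])
--
--     return evonum_list, name_list, req_list
--
-- def output_format(tup_list : list):
--
--     evonum_list, name_list, req_list = split_tup_vals(tup_list)
--
--     outstring = ''
--     sixtab = False
--     fourtab = False
--     for i,value in enumerate(tup_list):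
--         if (i != 0 and evonum_list[i] == evonum_list[i-1]):
--             if (sixtab):
--                 outstring = outstring + '\n' + '\t\t\t' + 'AND\n'
--                 sixtab = False
--             elif (fourtab):
--                 outstring = outstring + '\n' + '\t\t' + 'AND\n'
--                 fourtab = False
--         elif (i != 0 and evonum_list[i] != evonum_list[i-1]):
--             outstring = outstring + '\n' + '\t\t' + 'OR\n'
--
--         if (evonum_list.count(evonum_list[i]) != len(evonum_list) and evonum_list.count(evonum_list[i]) > 1):
--             outstring = outstring + '\t\t\t\t' + req_list[i]
--             sixtab = True
--         elif (evonum_list.count(evonum_list[i]) != len(evonum_list) and evonum_list.count(evonum_list[i]) == 1):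
--             outstring =  outstring + '\t\t\t' + req_list[i]
--         elif (evonum_list.count(evonum_list[i]) == len(evonum_list) and evonum_list.count(evonum_list[i]) > 1):
--             outstring =  outstring + '\t\t\t' + req_list[i]
--             fourtab = True
--         elif (evonum_list.count(evonum_list[i]) == len(evonum_list) and evonum_list.count(evonum_list[i]) == 1):
--             outstring =  outstring + '\t\t' + req_list[i]
--
--     return outstring
-- ===== SOURCE B (Python) =====
-- def output_format(tup_list : list):
--     # staged pipeline: count pass, consecutive-run grouping pass, then render
--     # each run as a join and join the runs with the OR separator
--     total = len(tup_list)
--     count = {}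
--     for t in tup_list:
--         count[t[0]] = count.get(t[0], 0) + 1
--     groups = []
--     for t in tup_list:
--         if groups and groups[-1][0] == t[0]:
--             groups[-1][1].append(t[3])
--         else:
--             groups.append((t[0], [t[3]]))
--     out_groups = []
--     for e, reqs in groups:
--         c = count[e]
--         if c != total and c > 1:
--             indent, sep = '\t\t\t\t', '\n\t\t\tAND\n'
--         elif c != total:
--             indent, sep = '\t\t\t', '\n\t\t\tAND\n'
--         elif c > 1:
--             indent, sep = '\t\t\t', '\n\t\tAND\n'
--         else:
--             indent, sep = '\t\t', '\n\t\tAND\n'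
--         out_groups.append(sep.join(indent + r for r in reqs))
--     return '\n\t\tOR\n'.join(out_groups)
-- ===== Notes on version B (the rewrite author's own statement) =====
-- stated objective: faster
-- what changed: B is a staged pipeline instead of A's single flag-driven loop: one pass builds a frequency table, one pass splits the list into consecutive runs of equal evonum, and a render pass turns each run into a string via sep.join and joins the runs with the OR separator, eliminating A's per-element list.count scans, sixtab/fourtab flag machinery and quadratic string concatenation.
-- outside the precondition, e.g. on output_format([]): A raises ValueError, B returns ''
import Mathlib
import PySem

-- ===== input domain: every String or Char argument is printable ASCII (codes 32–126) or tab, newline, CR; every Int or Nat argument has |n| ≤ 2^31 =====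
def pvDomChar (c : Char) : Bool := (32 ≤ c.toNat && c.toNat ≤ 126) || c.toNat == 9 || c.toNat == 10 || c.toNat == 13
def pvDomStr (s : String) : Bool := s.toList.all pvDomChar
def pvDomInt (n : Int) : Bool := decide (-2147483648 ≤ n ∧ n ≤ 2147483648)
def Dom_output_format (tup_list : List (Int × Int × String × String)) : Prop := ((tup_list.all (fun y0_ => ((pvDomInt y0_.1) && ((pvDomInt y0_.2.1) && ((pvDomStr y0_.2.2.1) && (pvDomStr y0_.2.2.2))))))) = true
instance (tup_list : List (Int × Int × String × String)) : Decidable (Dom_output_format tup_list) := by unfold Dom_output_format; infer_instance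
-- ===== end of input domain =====

-- B replaces A's single flag-driven loop with per-element count scans by a staged
-- pipeline (frequency table, consecutive-run grouping, join-based rendering);
-- equal output on every non-empty list.

-- ===== PORT A =====
-- On [] the Python split_tup_vals returns [] and the unpacking in output_format raises
-- ValueError; that input is outside Pre_ below (the Lean port just returns the triple).
def split_tup_vals (tup_list : List (Int × Int × String × String)) :
    List Int × List String × List String :=
  tup_list.foldl
    (fun acc t => (acc.1 ++ [t.1], acc.2.1 ++ [t.2.2.1], acc.2.2 ++ [t.2.2.2]))
    ([], [], [])

def outputStepA (evonum_list : List Int) (req_list : List String)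
    (st : String × Bool × Bool) (iv : Int × (Int × Int × String × String)) :
    String × Bool × Bool :=
  let i := iv.1
  let st1 :=
    if i ≠ 0 ∧ PySem.List.pyGetD evonum_list i 0 = PySem.List.pyGetD evonum_list (i - 1) 0 then
      if st.2.1 then (st.1 ++ "\n" ++ "\t\t\t" ++ "AND\n", false, st.2.2)
      else if st.2.2 then (st.1 ++ "\n" ++ "\t\t" ++ "AND\n", st.2.1, false)
      else st
    else if i ≠ 0 ∧ PySem.List.pyGetD evonum_list i 0 ≠ PySem.List.pyGetD evonum_list (i - 1) 0 then
      (st.1 ++ "\n" ++ "\t\t" ++ "OR\n", st.2.1, st.2.2)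
    else st
  let c := PySem.List.count evonum_list (PySem.List.pyGetD evonum_list i 0)
  let n := evonum_list.length
  let r := PySem.List.pyGetD req_list i ""
  if c ≠ n ∧ c > 1 then (st1.1 ++ "\t\t\t\t" ++ r, true, st1.2.2)
  else if c ≠ n ∧ c = 1 then (st1.1 ++ "\t\t\t" ++ r, st1.2.1, st1.2.2)
  else if c = n ∧ c > 1 then (st1.1 ++ "\t\t\t" ++ r, st1.2.1, true)
  else if c = n ∧ c = 1 then (st1.1 ++ "\t\t" ++ r, st1.2.1, st1.2.2)
  else st1

def output_format (tup_list : List (Int × Int × String × String)) : String :=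
  ((PySem.List.enumerate tup_list 0).foldl
    (outputStepA (split_tup_vals tup_list).1 (split_tup_vals tup_list).2.2)
    ("", false, false)).1

-- ===== PORT B =====
-- one grouping step of Source B's second loop: append req to the last run if the
-- evonum matches, else start a new run
def bStep (gs : List (Int × List String)) (t : Int × Int × String × String) :
    List (Int × List String) :=
  match gs.getLast? with
  | some g =>
      if g.1 = t.1 then gs.dropLast ++ [(g.1, g.2 ++ [t.2.2.2])]
      else gs ++ [(t.1, [t.2.2.2])]
  | none => gs ++ [(t.1, [t.2.2.2])]

-- Source B's 4-way (indent, sep) table for a run whose evonum has count c out of total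
def bIndentSep (c total : Int) : String × String :=
  if c ≠ total ∧ c > 1 then ("\t\t\t\t", "\n\t\t\tAND\n")
  else if c ≠ total then ("\t\t\t", "\n\t\t\tAND\n")
  else if c > 1 then ("\t\t\t", "\n\t\tAND\n")
  else ("\t\t", "\n\t\tAND\n")

-- render one run: sep.join(indent + r for r in reqs)
def bGroupStr (count : PySem.Dict Int Int) (total : Int) (g : Int × List String) : String :=
  let p := bIndentSep (count.getD g.1 0) total
  PySem.Str.join p.2 (g.2.map (fun r => p.1 ++ r))

def output_format_alt (tup_list : List (Int × Int × String × String)) : String :=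
  let total : Int := tup_list.length
  let count := tup_list.foldl (fun d t => d.insert t.1 (d.getD t.1 0 + 1)) PySem.Dict.empty
  let groups := tup_list.foldl bStep []
  PySem.Str.join "\n\t\tOR\n" (groups.map (bGroupStr count total))

-- ===== PRECONDITION & SPEC =====
-- Pre_ excludes only the empty list, on which the Python A raises ValueError
-- (unpacking split_tup_vals([]) = [] into three variables).
def Pre_output_format (tup_list : List (Int × Int × String × String)) : Prop :=
  tup_list ≠ []
instance (tup_list : List (Int × Int × String × String)) : Decidable (Pre_output_format tup_list) := by
  unfold Pre_output_format; infer_instance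

def pvWitness_output_format : (List (Int × Int × String × String)) := [(1, 0, "n", "r")]

def Spec_output_format (tup_list : List (Int × Int × String × String)) (out : String) : Prop :=
  out = output_format_alt tup_list
instance (tup_list : List (Int × Int × String × String)) (out : String) : Decidable (Spec_output_format tup_list out) := by
  unfold Spec_output_format; infer_instance

-- ===== CLAIM (what is proved, stated in full; the proofs are below) =====
def Claim_equal_output_format : Prop := ∀ (tup_list : List (Int × Int × String × String)), Dom_output_format tup_list → Pre_output_format tup_list → Spec_output_format tup_list (output_format tup_list)

-- ===== LEMMAS AND PROOFS =====

-- rendering of a whole group list (what output_format_alt computes from `groups`)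
def pvRender (count : PySem.Dict Int Int) (total : Int) (gs : List (Int × List String)) : String :=
  PySem.Str.join "\n\t\tOR\n" (gs.map (bGroupStr count total))

-- the A-side sixtab flag, after processing the first k elements, is exactly
-- "some already-processed element has a count that is neither 1 nor the whole length"
def pvCond6 (es : List Int) (j : Nat) : Prop :=
  es.count (es.getD j 0) ≠ es.length ∧ 1 < es.count (es.getD j 0)

-- likewise fourtab: "some already-processed element's count equals the whole length (> 1)"
def pvCond4 (es : List Int) (j : Nat) : Prop :=
  es.count (es.getD j 0) = es.length ∧ 1 < es.count (es.getD j 0)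

lemma pv_exlt_succ {P : Nat → Prop} {k : Nat} :
    (∃ j < k + 1, P j) ↔ (∃ j < k, P j) ∨ P k := by
  constructor
  · rintro ⟨j, hj, hp⟩
    rcases Nat.lt_succ_iff_lt_or_eq.mp hj with h | h
    · exact Or.inl ⟨j, h, hp⟩
    · subst h; exact Or.inr hp
  · rintro (⟨j, hj, hp⟩ | hp)
    · exact ⟨j, Nat.lt_succ_of_lt hj, hp⟩
    · exact ⟨k, Nat.lt_succ_self k, hp⟩

lemma pv_cjoin_snoc (sep : List Char) (xs : List (List Char)) (y : List Char) (h : xs ≠ []) :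
    PySem.Chars.join sep (xs ++ [y]) = PySem.Chars.join sep xs ++ sep ++ y := by
  induction xs with
  | nil => exact absurd rfl h
  | cons p rest ih =>
    cases rest with
    | nil =>
      simp [PySem.Chars.join_cons_cons, PySem.Chars.join_singleton]
    | cons q r =>
      have h2 : (q :: r) ≠ ([] : List (List Char)) := by simp
      have ih' : PySem.Chars.join sep (q :: (r ++ [y]))
          = PySem.Chars.join sep (q :: r) ++ sep ++ y := ih h2
      simp only [List.cons_append]
      rw [PySem.Chars.join_cons_cons sep p q (r ++ [y]),
          PySem.Chars.join_cons_cons sep p q r, ih']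
      simp

lemma pv_sjoin_snoc (sep : String) (xs : List String) (y : String) (h : xs ≠ []) :
    PySem.Str.join sep (xs ++ [y]) = PySem.Str.join sep xs ++ sep ++ y := by
  apply String.toList_injective
  have hx : xs.map String.toList ≠ [] := by simpa using h
  simp [PySem.Str.join, pv_cjoin_snoc sep.toList (xs.map String.toList) y.toList hx]

lemma pv_sjoin_single (sep : String) (x : String) :
    PySem.Str.join sep [x] = x := by
  apply String.toList_injective
  simp [PySem.Str.join, PySem.Chars.join_singleton]

lemma pv_render_single (c : PySem.Dict Int Int) (t : Int) (g : Int × List String) :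
    pvRender c t [g] = bGroupStr c t g := by
  simp [pvRender, pv_sjoin_single]

lemma pv_render_snoc (c : PySem.Dict Int Int) (t : Int) (gs : List (Int × List String))
    (g : Int × List String) (h : gs ≠ []) :
    pvRender c t (gs ++ [g]) = pvRender c t gs ++ "\n\t\tOR\n" ++ bGroupStr c t g := by
  have hm : gs.map (bGroupStr c t) ≠ [] := by simpa using h
  simp [pvRender, pv_sjoin_snoc _ _ _ hm]

lemma pv_group_single (c : PySem.Dict Int Int) (t : Int) (e : Int) (r : String) :
    bGroupStr c t (e, [r]) = (bIndentSep (c.getD e 0) t).1 ++ r := by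
  simp [bGroupStr, pv_sjoin_single]

lemma pv_group_snoc (c : PySem.Dict Int Int) (t : Int) (e : Int) (rs : List String)
    (r : String) (h : rs ≠ []) :
    bGroupStr c t (e, rs ++ [r])
      = bGroupStr c t (e, rs) ++ (bIndentSep (c.getD e 0) t).2
          ++ ((bIndentSep (c.getD e 0) t).1 ++ r) := by
  have hm : rs.map (fun s => (bIndentSep (c.getD e 0) t).1 ++ s) ≠ [] := by simpa using h
  simp [bGroupStr, pv_sjoin_snoc _ _ _ hm]

-- replacing the last group by one whose rendering is the old one extended by d
lemma pv_render_last (c : PySem.Dict Int Int) (t : Int) (gs' : List (Int × List String))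
    (g g' : Int × List String) (d : String)
    (h : bGroupStr c t g' = bGroupStr c t g ++ d) :
    pvRender c t (gs' ++ [g']) = pvRender c t (gs' ++ [g]) ++ d := by
  cases gs' with
  | nil => simp [pv_render_single, h]
  | cons a l =>
    rw [pv_render_snoc c t (a :: l) g' (by simp), pv_render_snoc c t (a :: l) g (by simp), h]
    apply String.toList_injective
    simp

lemma pv_split_aux (tl : List (Int × Int × String × String)) :
    ∀ (a : List Int) (b c : List String),
      tl.foldl (fun acc t => (acc.1 ++ [t.1], acc.2.1 ++ [t.2.2.1], acc.2.2 ++ [t.2.2.2])) (a, b, c)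
        = (a ++ tl.map (fun t => t.1), b ++ tl.map (fun t => t.2.2.1), c ++ tl.map (fun t => t.2.2.2)) := by
  induction tl with
  | nil => intro a b c; simp
  | cons t rest ih => intro a b c; simp [List.foldl_cons, ih]

lemma pv_split (tl : List (Int × Int × String × String)) :
    split_tup_vals tl
      = (tl.map (fun t => t.1), tl.map (fun t => t.2.2.1), tl.map (fun t => t.2.2.2)) := by
  have h := pv_split_aux tl [] [] []
  simpa [split_tup_vals] using h

lemma pv_two_le (es : List Int) (k : Nat) (hk : k < es.length) (h0 : 0 < k)
    (hadj : es.getD k 0 = es.getD (k - 1) 0) : 2 ≤ es.count (es.getD k 0) := by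
  have hv : es[k - 1]'(by omega) = es[k]'hk := by
    rw [← List.getD_eq_getElem es 0 (by omega : k - 1 < es.length),
        ← List.getD_eq_getElem es 0 hk, hadj]
  have hgoal : 2 ≤ es.count es[k] := by
    have hsplit : es.count es[k] = (es.take k).count es[k] + (es.drop k).count es[k] := by
      rw [← List.count_append, List.take_append_drop]
    have hmem1 : es[k] ∈ es.take k := by
      rw [List.mem_take_iff_getElem]
      exact ⟨k - 1, by omega, hv⟩
    have hmem2 : es[k] ∈ es.drop k := by
      have h : (es.drop k)[0]'(by simp; omega) = es[k] := by simp [List.getElem_drop]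
      rw [← h]; exact List.getElem_mem _
    have := List.count_pos_iff.mpr hmem1
    have := List.count_pos_iff.mpr hmem2
    omega
  rwa [List.getD_eq_getElem es 0 hk]

theorem pv_loop (tl : List (Int × Int × String × String)) (es : List Int) (reqs : List String)
    (hes : es = tl.map (fun t => t.1)) (hreqs : reqs = tl.map (fun t => t.2.2.2))
    (freq : PySem.Dict Int Int) (hfreq : ∀ v, freq.getD v 0 = (es.count v : Int)) :
    ∀ (sfx : List (Int × Int × String × String)), ∀ (k : Nat), sfx = tl.drop k →
    ∀ (six four : Bool) (gs : List (Int × List String)),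
      (six = true ↔ ∃ j < k, pvCond6 es j) →
      (four = true ↔ ∃ j < k, pvCond4 es j) →
      (k = 0 → gs = []) →
      (0 < k → ∃ gs' rs, gs = gs' ++ [(es.getD (k - 1) 0, rs)] ∧ rs ≠ []) →
      ((PySem.List.enumerate sfx (k : Int)).foldl (outputStepA es reqs)
          (pvRender freq (tl.length : Int) gs, six, four)).1
        = pvRender freq (tl.length : Int) (sfx.foldl bStep gs) := by
  intro sfx
  induction sfx with
  | nil =>
    intro k _ six four gs _ _ _ _
    simp [PySem.List.enumerate_nil]
  | cons t rest ih =>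
    intro k hdrop six four gs h2 h3 h4 h5
    have hlen : es.length = tl.length := by rw [hes]; simp
    have hk : k < tl.length := by
      by_contra hge
      rw [List.drop_eq_nil_of_le (by omega)] at hdrop
      exact absurd hdrop (by simp)
    have hkes : k < es.length := by omega
    have htk : tl[k]? = some t := by
      have h0 : (tl.drop k)[0]? = some t := by rw [← hdrop]; rfl
      rw [List.getElem?_drop] at h0; simpa using h0
    have hrest : rest = tl.drop (k + 1) := by
      have h0 : (t :: rest).drop 1 = (tl.drop k).drop 1 := by rw [hdrop]
      simpa [List.drop_drop, Nat.add_comm] using h0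
    have hgq : es[k]? = some t.1 := by rw [hes, List.getElem?_map, htk]; rfl
    have hrq : reqs[k]? = some t.2.2.2 := by rw [hreqs, List.getElem?_map, htk]; rfl
    have hesk : es.getD k 0 = t.1 := by simp [List.getD_eq_getElem?_getD, hgq]
    have hmem : t.1 ∈ es := by
      rw [hes]
      exact List.mem_map.mpr ⟨t, List.mem_of_getElem? htk, rfl⟩
    have hc0 : 0 < es.count t.1 := List.count_pos_iff.mpr hmem
    have hfv : freq.getD t.1 0 = (es.count t.1 : Int) := hfreq t.1
    rw [PySem.List.enumerate_cons, List.foldl_cons, List.foldl_cons,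
        (show (k : Int) + 1 = ((k + 1 : Nat) : Int) by push_cast; ring)]
    by_cases hk0 : k = 0
    · subst hk0
      have hgs0 : gs = [] := h4 rfl
      subst hgs0
      have hBnew : bStep [] t = [(t.1, [t.2.2.2])] := by simp [bStep]
      have h6 : six = false := by
        cases six with
        | false => rfl
        | true => exact absurd (h2.mp rfl) (by rintro ⟨j, hj, _⟩; omega)
      have h7 : four = false := by
        cases four with
        | false => rfl
        | true => exact absurd (h3.mp rfl) (by rintro ⟨j, hj, _⟩; omega)
      subst h6; subst h7
      by_cases hcn : es.count t.1 = es.length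
      · by_cases hc1 : 1 < es.count t.1
        · -- L3: count = length > 1 (constant list, several members)
          have hA : outputStepA es reqs (pvRender freq (tl.length : Int) [], false, false) (((0 : Nat) : Int), t)
              = (pvRender freq (tl.length : Int) [] ++ "\t\t\t" ++ t.2.2.2, false, true) := by
            simp [outputStepA, PySem.List.pyGetD_zero, List.getD_eq_getElem?_getD, hgq, hrq,
              hcn, (show 1 < es.length by omega), (show es.length ≠ 1 by omega)]
          have hst : pvRender freq (tl.length : Int) [] ++ "\t\t\t" ++ t.2.2.2
              = pvRender freq (tl.length : Int) [(t.1, [t.2.2.2])] := by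
            rw [pv_render_single, pv_group_single]
            have : (bIndentSep (freq.getD t.1 0) (tl.length : Int)).1 = "\t\t\t" := by
              simp [bIndentSep, hfv, ← hlen, hcn,
                (show (1 : Int) < (es.length : Int) by omega)]
            rw [this]
            apply String.toList_injective
            simp [pvRender, PySem.Str.join, PySem.Chars.join_nil]
          rw [hA, hst, hBnew]
          refine ih (0 + 1) hrest _ _ _ ?_ ?_ ?_ ?_
          · simp only [Bool.false_eq_true, false_iff]
            rintro ⟨j, hj, hp⟩
            have hj0 : j = 0 := by omega
            subst hj0
            simp only [pvCond6] at hp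
            rw [hesk] at hp
            exact hp.1 hcn
          · exact ⟨fun _ => ⟨0, by omega, by simp only [pvCond4]; rw [hesk]; exact ⟨hcn, hc1⟩⟩,
              fun _ => rfl⟩
          · omega
          · intro _
            exact ⟨[], [t.2.2.2], by simp [List.getD_eq_getElem?_getD, hgq], by simp⟩
        · -- L4: count = length = 1 (single element)
          have hone : es.count t.1 = 1 := by omega
          have hg0 : es[0]'hkes = t.1 := by
            rw [← List.getD_eq_getElem es 0 hkes]; exact hesk
          have hA : outputStepA es reqs (pvRender freq (tl.length : Int) [], false, false) (((0 : Nat) : Int), t)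
              = (pvRender freq (tl.length : Int) [] ++ "\t\t" ++ t.2.2.2, false, false) := by
            simp [outputStepA, PySem.List.pyGetD_zero, List.getD_eq_getElem?_getD, hgq, hg0, hrq,
              hcn, hone, (show es.length = 1 by omega)]
          have hst : pvRender freq (tl.length : Int) [] ++ "\t\t" ++ t.2.2.2
              = pvRender freq (tl.length : Int) [(t.1, [t.2.2.2])] := by
            rw [pv_render_single, pv_group_single]
            have : (bIndentSep (freq.getD t.1 0) (tl.length : Int)).1 = "\t\t" := by
              simp [bIndentSep, hfv, ← hlen, hcn, hone, (show es.length = 1 by omega)]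
            rw [this]
            apply String.toList_injective
            simp [pvRender, PySem.Str.join, PySem.Chars.join_nil]
          rw [hA, hst, hBnew]
          refine ih (0 + 1) hrest _ _ _ ?_ ?_ ?_ ?_
          · simp only [Bool.false_eq_true, false_iff]
            rintro ⟨j, hj, hp⟩
            have hj0 : j = 0 := by omega
            subst hj0
            simp only [pvCond6] at hp
            rw [hesk] at hp
            omega
          · simp only [Bool.false_eq_true, false_iff]
            rintro ⟨j, hj, hp⟩
            have hj0 : j = 0 := by omega
            subst hj0
            simp only [pvCond4] at hp
            rw [hesk] at hp
            omega
          · omega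
          · intro _
            exact ⟨[], [t.2.2.2], by simp [List.getD_eq_getElem?_getD, hgq], by simp⟩
      · by_cases hc1 : 1 < es.count t.1
        · -- L1: count ≠ length, count > 1
          have hA : outputStepA es reqs (pvRender freq (tl.length : Int) [], false, false) (((0 : Nat) : Int), t)
              = (pvRender freq (tl.length : Int) [] ++ "\t\t\t\t" ++ t.2.2.2, true, false) := by
            simp [outputStepA, PySem.List.pyGetD_zero, List.getD_eq_getElem?_getD, hgq, hrq,
              hcn, hc1, (show es.count t.1 ≠ 1 by omega)]
          have hst : pvRender freq (tl.length : Int) [] ++ "\t\t\t\t" ++ t.2.2.2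
              = pvRender freq (tl.length : Int) [(t.1, [t.2.2.2])] := by
            rw [pv_render_single, pv_group_single]
            have : (bIndentSep (freq.getD t.1 0) (tl.length : Int)).1 = "\t\t\t\t" := by
              simp [bIndentSep, hfv, ← hlen,
                (show ((es.count t.1 : Int)) ≠ ((es.length : Int)) by omega),
                (show (1 : Int) < ((es.count t.1 : Int)) by omega)]
            rw [this]
            apply String.toList_injective
            simp [pvRender, PySem.Str.join, PySem.Chars.join_nil]
          rw [hA, hst, hBnew]
          refine ih (0 + 1) hrest _ _ _ ?_ ?_ ?_ ?_
          · exact ⟨fun _ => ⟨0, by omega, by simp only [pvCond6]; rw [hesk]; exact ⟨hcn, hc1⟩⟩,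
              fun _ => rfl⟩
          · simp only [Bool.false_eq_true, false_iff]
            rintro ⟨j, hj, hp⟩
            have hj0 : j = 0 := by omega
            subst hj0
            simp only [pvCond4] at hp
            rw [hesk] at hp
            exact hcn hp.1
          · omega
          · intro _
            exact ⟨[], [t.2.2.2], by simp [List.getD_eq_getElem?_getD, hgq], by simp⟩
        · -- L2: count = 1 ≠ length
          have hone : es.count t.1 = 1 := by omega
          have hA : outputStepA es reqs (pvRender freq (tl.length : Int) [], false, false) (((0 : Nat) : Int), t)
              = (pvRender freq (tl.length : Int) [] ++ "\t\t\t" ++ t.2.2.2, false, false) := by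
            simp [outputStepA, PySem.List.pyGetD_zero, List.getD_eq_getElem?_getD, hgq, hrq,
              hone, (show (1 : Nat) ≠ es.length by omega)]
          have hst : pvRender freq (tl.length : Int) [] ++ "\t\t\t" ++ t.2.2.2
              = pvRender freq (tl.length : Int) [(t.1, [t.2.2.2])] := by
            rw [pv_render_single, pv_group_single]
            have : (bIndentSep (freq.getD t.1 0) (tl.length : Int)).1 = "\t\t\t" := by
              simp [bIndentSep, hfv, ← hlen, hone,
                (show ((1 : Int)) ≠ ((es.length : Int)) by omega)]
            rw [this]
            apply String.toList_injective
            simp [pvRender, PySem.Str.join, PySem.Chars.join_nil]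
          rw [hA, hst, hBnew]
          refine ih (0 + 1) hrest _ _ _ ?_ ?_ ?_ ?_
          · simp only [Bool.false_eq_true, false_iff]
            rintro ⟨j, hj, hp⟩
            have hj0 : j = 0 := by omega
            subst hj0
            simp only [pvCond6] at hp
            rw [hesk] at hp
            omega
          · simp only [Bool.false_eq_true, false_iff]
            rintro ⟨j, hj, hp⟩
            have hj0 : j = 0 := by omega
            subst hj0
            simp only [pvCond4] at hp
            rw [hesk] at hp
            omega
          · omega
          · intro _
            exact ⟨[], [t.2.2.2], by simp [List.getD_eq_getElem?_getD, hgq], by simp⟩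
    · -- k > 0
      have hki : (k : Int) ≠ 0 := by omega
      have hcast : (k : Int) - 1 = ((k - 1 : Nat) : Int) := by omega
      obtain ⟨gs', rs, hgs, hrs⟩ := h5 (by omega)
      by_cases hadj : es.getD k 0 = es.getD (k - 1) 0
      · have hadj' : es.getD (k - 1) 0 = t.1 := by rw [← hadj, hesk]
        have hadjq : es[k - 1]? = some t.1 := by
          have h9 : es[k - 1]'(by omega) = t.1 := by
            rw [← List.getD_eq_getElem es 0 (by omega : k - 1 < es.length)]; exact hadj'
          rw [List.getElem?_eq_getElem (by omega : k - 1 < es.length), h9]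
        have h2le : 2 ≤ es.count t.1 := by
          have h := pv_two_le es k hkes (by omega) hadj
          rwa [hesk] at h
        have hBnew : bStep gs t = gs' ++ [(t.1, rs ++ [t.2.2.2])] := by
          rw [hgs, hadj']
          simp [bStep, List.getLast?_concat, List.dropLast_concat]
        by_cases hcn : es.count t.1 = es.length
        · -- L6: adjacent equal, constant list
          have hconst := List.count_eq_length.mp hcn
          have hnosix : ∀ j, j < es.length → ¬ pvCond6 es j := by
            intro j hj hp
            have hgd : es.getD j 0 = t.1 := by
              rw [List.getD_eq_getElem es 0 hj]
              exact (hconst _ (List.getElem_mem _)).symm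
            simp only [pvCond6] at hp
            rw [hgd] at hp
            exact hp.1 hcn
          have h6 : six = false := by
            cases six with
            | false => rfl
            | true =>
              rcases h2.mp rfl with ⟨j, hj, hp⟩
              exact absurd hp (hnosix j (by omega))
          have h7 : four = true :=
            h3.mpr ⟨k - 1, by omega, by simp only [pvCond4]; rw [hadj']; exact ⟨hcn, by omega⟩⟩
          subst h6; subst h7
          have hA : outputStepA es reqs (pvRender freq (tl.length : Int) gs, false, true) ((k : Int), t)
              = (pvRender freq (tl.length : Int) gs ++ "\n" ++ "\t\t" ++ "AND\n" ++ "\t\t\t" ++ t.2.2.2, false, true) := by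
            simp [outputStepA, hk0, hki, hcast, hgq, hrq, hadjq, hcn,
              (show 1 < es.length by omega), (show es.length ≠ 1 by omega)]
          have hIS : bIndentSep (freq.getD t.1 0) (tl.length : Int) = ("\t\t\t", "\n\t\tAND\n") := by
            simp [bIndentSep, hfv, ← hlen, hcn,
              (show (1 : Int) < ((es.length : Int)) by omega)]
          have hst : pvRender freq (tl.length : Int) gs ++ "\n" ++ "\t\t" ++ "AND\n" ++ "\t\t\t" ++ t.2.2.2
              = pvRender freq (tl.length : Int) (gs' ++ [(t.1, rs ++ [t.2.2.2])]) := by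
            rw [hgs, hadj',
              pv_render_last freq (tl.length : Int) gs' (t.1, rs) (t.1, rs ++ [t.2.2.2])
                ("\n\t\tAND\n" ++ ("\t\t\t" ++ t.2.2.2))
                (by rw [pv_group_snoc _ _ _ _ _ hrs, hIS]
                    apply String.toList_injective; simp)]
            apply String.toList_injective
            simp
          rw [hA, hst, hBnew]
          refine ih (k + 1) hrest _ _ _ ?_ ?_ ?_ ?_
          · simp only [Bool.false_eq_true, false_iff]
            rintro ⟨j, hj, hp⟩
            exact hnosix j (by omega) hp
          · exact ⟨fun _ => ⟨k, by omega,
              by simp only [pvCond4]; rw [hesk]; exact ⟨hcn, by omega⟩⟩, fun _ => rfl⟩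
          · omega
          · intro _
            exact ⟨gs', rs ++ [t.2.2.2], by simp [List.getD_eq_getElem?_getD, hgq], by simp⟩
        · -- L5: adjacent equal, count ≠ length (> 1)
          have h6 : six = true :=
            h2.mpr ⟨k - 1, by omega, by simp only [pvCond6]; rw [hadj']; exact ⟨hcn, by omega⟩⟩
          subst h6
          have hA : outputStepA es reqs (pvRender freq (tl.length : Int) gs, true, four) ((k : Int), t)
              = (pvRender freq (tl.length : Int) gs ++ "\n" ++ "\t\t\t" ++ "AND\n" ++ "\t\t\t\t" ++ t.2.2.2, true, four) := by
            simp [outputStepA, hk0, hki, hcast, hgq, hrq, hadjq, hcn,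
              (show 1 < es.count t.1 by omega), (show es.count t.1 ≠ 1 by omega)]
          have hIS : bIndentSep (freq.getD t.1 0) (tl.length : Int) = ("\t\t\t\t", "\n\t\t\tAND\n") := by
            simp [bIndentSep, hfv, ← hlen,
              (show ((es.count t.1 : Int)) ≠ ((es.length : Int)) by omega),
              (show (1 : Int) < ((es.count t.1 : Int)) by omega)]
          have hst : pvRender freq (tl.length : Int) gs ++ "\n" ++ "\t\t\t" ++ "AND\n" ++ "\t\t\t\t" ++ t.2.2.2
              = pvRender freq (tl.length : Int) (gs' ++ [(t.1, rs ++ [t.2.2.2])]) := by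
            rw [hgs, hadj',
              pv_render_last freq (tl.length : Int) gs' (t.1, rs) (t.1, rs ++ [t.2.2.2])
                ("\n\t\t\tAND\n" ++ ("\t\t\t\t" ++ t.2.2.2))
                (by rw [pv_group_snoc _ _ _ _ _ hrs, hIS]
                    apply String.toList_injective; simp)]
            apply String.toList_injective
            simp
          rw [hA, hst, hBnew]
          refine ih (k + 1) hrest _ _ _ ?_ ?_ ?_ ?_
          · exact ⟨fun _ => ⟨k, by omega,
              by simp only [pvCond6]; rw [hesk]; exact ⟨hcn, by omega⟩⟩, fun _ => rfl⟩
          · rw [pv_exlt_succ, h3]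
            simp [pvCond4, List.getD_eq_getElem?_getD, hgq, hcn]
          · omega
          · intro _
            exact ⟨gs', rs ++ [t.2.2.2], by simp [List.getD_eq_getElem?_getD, hgq], by simp⟩
      · -- adjacent different
        rw [hesk] at hadj
        have hne2 : t.1 ≠ es[k - 1]?.getD 0 := by
          rw [← List.getD_eq_getElem?_getD]; exact hadj
        have hlastne : es.getD (k - 1) 0 ≠ t.1 := fun h => hadj h.symm
        have hne3 : es[k - 1]?.getD 0 ≠ t.1 := by
          rw [← List.getD_eq_getElem?_getD]; exact hlastne
        have hBnew : bStep gs t = gs ++ [(t.1, [t.2.2.2])] := by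
          rw [hgs]
          simp [bStep, List.getLast?_concat, hne3]
        have hgsne : gs ≠ [] := by rw [hgs]; simp
        have hcnf : es.count t.1 ≠ es.length := by
          intro hcn
          have hconst := List.count_eq_length.mp hcn
          have ha : es.getD (k - 1) 0 = t.1 := by
            rw [List.getD_eq_getElem es 0 (by omega : k - 1 < es.length)]
            exact (hconst _ (List.getElem_mem _)).symm
          exact hadj ha.symm
        by_cases hc1 : 1 < es.count t.1
        · -- L7: OR then four tabs
          have hA : outputStepA es reqs (pvRender freq (tl.length : Int) gs, six, four) ((k : Int), t)
              = (pvRender freq (tl.length : Int) gs ++ "\n" ++ "\t\t" ++ "OR\n" ++ "\t\t\t\t" ++ t.2.2.2, true, four) := by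
            simp [outputStepA, hk0, hki, hcast, hgq, hrq, hne2, hcnf, hc1,
              (show es.count t.1 ≠ 1 by omega)]
          have hIS : bIndentSep (freq.getD t.1 0) (tl.length : Int) = ("\t\t\t\t", "\n\t\t\tAND\n") := by
            simp [bIndentSep, hfv, ← hlen,
              (show ((es.count t.1 : Int)) ≠ ((es.length : Int)) by omega),
              (show (1 : Int) < ((es.count t.1 : Int)) by omega)]
          have hst : pvRender freq (tl.length : Int) gs ++ "\n" ++ "\t\t" ++ "OR\n" ++ "\t\t\t\t" ++ t.2.2.2
              = pvRender freq (tl.length : Int) (gs ++ [(t.1, [t.2.2.2])]) := by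
            rw [pv_render_snoc _ _ _ _ hgsne, pv_group_single, hIS]
            apply String.toList_injective
            simp
          rw [hA, hst, hBnew]
          refine ih (k + 1) hrest _ _ _ ?_ ?_ ?_ ?_
          · exact ⟨fun _ => ⟨k, by omega,
              by simp only [pvCond6]; rw [hesk]; exact ⟨hcnf, hc1⟩⟩, fun _ => rfl⟩
          · rw [pv_exlt_succ, h3]
            simp [pvCond4, List.getD_eq_getElem?_getD, hgq, hcnf]
          · omega
          · intro _
            exact ⟨gs, [t.2.2.2], by simp [List.getD_eq_getElem?_getD, hgq], by simp⟩
        · -- L8: OR then three tabs (count = 1)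
          have hone : es.count t.1 = 1 := by omega
          have hA : outputStepA es reqs (pvRender freq (tl.length : Int) gs, six, four) ((k : Int), t)
              = (pvRender freq (tl.length : Int) gs ++ "\n" ++ "\t\t" ++ "OR\n" ++ "\t\t\t" ++ t.2.2.2, six, four) := by
            simp [outputStepA, hk0, hki, hcast, hgq, hrq, hne2, hone,
              (show (1 : Nat) ≠ es.length by omega)]
          have hIS : bIndentSep (freq.getD t.1 0) (tl.length : Int) = ("\t\t\t", "\n\t\t\tAND\n") := by
            simp [bIndentSep, hfv, ← hlen, hone,
              (show ((1 : Int)) ≠ ((es.length : Int)) by omega)]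
          have hst : pvRender freq (tl.length : Int) gs ++ "\n" ++ "\t\t" ++ "OR\n" ++ "\t\t\t" ++ t.2.2.2
              = pvRender freq (tl.length : Int) (gs ++ [(t.1, [t.2.2.2])]) := by
            rw [pv_render_snoc _ _ _ _ hgsne, pv_group_single, hIS]
            apply String.toList_injective
            simp
          rw [hA, hst, hBnew]
          refine ih (k + 1) hrest _ _ _ ?_ ?_ ?_ ?_
          · rw [pv_exlt_succ, h2]
            simp [pvCond6, List.getD_eq_getElem?_getD, hgq, hone]
          · rw [pv_exlt_succ, h3]
            simp [pvCond4, List.getD_eq_getElem?_getD, hgq, hone]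
          · omega
          · intro _
            exact ⟨gs, [t.2.2.2], by simp [List.getD_eq_getElem?_getD, hgq], by simp⟩

-- ===== VERDICT (by name: the statement is the Claim_ definition above) =====
theorem output_format_spec : Claim_equal_output_format := by
  intro tl _ _
  unfold Spec_output_format
  show output_format tl = output_format_alt tl
  unfold output_format output_format_alt
  simp only [pv_split]
  have hcnt : ∀ v, (tl.foldl (fun d t => d.insert t.1 (d.getD t.1 0 + 1)) PySem.Dict.empty).getD v 0
      = ((tl.map (fun t => t.1)).count v : Int) := by
    intro v
    have hmap : (tl.map (fun t : Int × Int × String × String => t.1)).foldl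
        (fun (d : PySem.Dict Int Int) e => d.insert e (d.getD e 0 + 1)) PySem.Dict.empty
        = tl.foldl (fun d t => d.insert t.1 (d.getD t.1 0 + 1)) PySem.Dict.empty :=
      List.foldl_map
    rw [← hmap, PySem.Dict.getD_foldl_insert_add_one]
    simp
  have h := pv_loop tl (tl.map (fun t => t.1)) (tl.map (fun t => t.2.2.2)) rfl rfl
      (tl.foldl (fun d t => d.insert t.1 (d.getD t.1 0 + 1)) PySem.Dict.empty) hcnt
      tl 0 (by simp : tl = tl.drop 0) false false [] (by simp) (by simp) (fun _ => rfl) (by omega)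
  have hempty : pvRender (tl.foldl (fun d t => d.insert t.1 (d.getD t.1 0 + 1)) PySem.Dict.empty)
      (tl.length : Int) [] = "" := by
    apply String.toList_injective
    simp [pvRender, PySem.Str.join, PySem.Chars.join_nil]
  rw [hempty] at h
  simpa [pvRender] using h
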